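-- pv_equiv track=rewrite | github.com/Aznricerr/DataMining_Project | decisionTree_template.py | stopCriteria
-- ===== SOURCE A (Python) =====
-- def stopCriteria(dataSet):
--     '''
--     Criteria to stop splitting:
--     1) if all the classe labels are the same, then return the class label;
--     2) if there are no more features to split, then return the majority label of the subset.
--
--     Parameters
--     -----------------
--     dataSet: 2-D list
--         [n_sampels, m_features + 1]
--         the last column is class label
--
--     Returns
--     ------------------
--     assignedLabel: string
--         if satisfying stop criteria, assignedLabel is the assigned class label;
--         else, assignedLabel is None
--     '''
--     assignedLabel = None
--     # TODO
--     lastCol = len(dataSet[0]) - 1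
--     labels = {}
--     for i in range(0, len(dataSet)):
--         labels[dataSet[i][lastCol]] = labels.get(dataSet[i][lastCol],0) + 1
--
--     if len(labels) == 1:
--         assignedLabel = list(labels.keys())[0]
--     elif lastCol == 0:
--         for key in labels:
--             if assignedLabel == None:
--                 assignedLabel = key
--             elif labels[assignedLabel] < labels[key]:
--                 assignedLabel = key
--
--     return assignedLabel
-- ===== SOURCE B (Python) =====
-- def _best(col):
--     # majority of a nonempty label list by recursive elimination:
--     # take the first label, count it by filtering it out, recurse on the rest;
--     # the head wins ties against the best of the rest (first-appearance order).
--     x = col[0]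
--     rest = [y for y in col if y != x]
--     c = len(col) - len(rest)
--     if not rest:
--         return x, c
--     l2, c2 = _best(rest)
--     return (x, c) if c >= c2 else (l2, c2)
--
--
-- def stopCriteria(dataSet):
--     lastCol = len(dataSet[0]) - 1
--     col = [row[lastCol] for row in dataSet]
--     rest = [y for y in col if y != col[0]]
--     if not rest:
--         return col[0]
--     if lastCol == 0:
--         label, _ = _best(col)
--         return label
--     return None
-- ===== Notes on version B (the rewrite author's own statement) =====
-- stated objective: alternative
-- what changed: B computes the majority by recursive elimination on the label column - take the first label, count it by filtering it out of the list, recurse on the shrunken remainder and let the head win ties against the best of the rest - instead of A's single pass that builds a frequency dictionary and then scans its keys with a strict-argmax loop; homogeneity is detected as 'filtering out the first label leaves nothing'.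
import Mathlib
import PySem

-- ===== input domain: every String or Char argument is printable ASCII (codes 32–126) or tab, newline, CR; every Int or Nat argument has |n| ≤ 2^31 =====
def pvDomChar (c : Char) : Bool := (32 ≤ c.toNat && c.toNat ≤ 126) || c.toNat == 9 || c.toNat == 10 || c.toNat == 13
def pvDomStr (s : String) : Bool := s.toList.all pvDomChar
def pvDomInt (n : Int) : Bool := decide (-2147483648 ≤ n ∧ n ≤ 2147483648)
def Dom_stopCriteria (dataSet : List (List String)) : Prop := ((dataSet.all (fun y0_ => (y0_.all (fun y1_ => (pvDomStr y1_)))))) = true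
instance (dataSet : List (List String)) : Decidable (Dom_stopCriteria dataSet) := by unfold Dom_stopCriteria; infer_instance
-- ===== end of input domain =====

-- B computes the majority by recursive elimination (filter out the first label, recurse
-- on the remainder) instead of A's frequency dictionary + key scan; objective: alternative.

-- ===== PORT A =====
-- A builds a count dict over the last column, returns its only key if it has one key,
-- else the strict-argmax key if there is exactly one column, else None.
def stopCriteria (dataSet : List (List String)) : Option String :=
  match PySem.List.pyGet? dataSet 0 with
  | none => none   -- len(dataSet[0]) raises IndexError on []
  | some row0 =>
    let lastCol : Int := (row0.length : Int) - 1
    let labels? : Option (PySem.Dict String Int) :=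
      dataSet.foldl (fun acc row =>
        acc.bind fun d => (PySem.List.pyGet? row lastCol).map fun l =>
          d.insert l (d.getD l 0 + 1)) (some PySem.Dict.empty)
    match labels? with
    | none => none   -- dataSet[i][lastCol] raises IndexError
    | some labels =>
      if labels.size = 1 then PySem.List.pyGet? labels.keys 0
      else if lastCol = 0 then
        -- labels[assignedLabel] / labels[key]: both keys are in the dict, so getD _ 0 is exact
        labels.keys.foldl (fun assigned key =>
          match assigned with
          | none => some key
          | some a => if labels.getD a 0 < labels.getD key 0 then some key else assigned) none
      else none

-- ===== PORT B =====
-- _best: take the first label, count it by filtering it out, recurse on the remainder;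
-- the head wins ties (>=) against the best of the rest.
def pvBest : List String → Option (String × Int)
  | [] => none
  | x :: t =>
    let rest := (x :: t).filter (fun y => y != x)
    let c : Int := ((x :: t).length : Int) - (rest.length : Int)
    match pvBest rest with
    | none => some (x, c)   -- `if not rest: return x, c`
    | some (l2, c2) => if c2 ≤ c then some (x, c) else some (l2, c2)
termination_by l => l.length
decreasing_by
  simp only [List.filter_cons, bne_self_eq_false, List.length_cons]
  exact Nat.lt_succ_of_le (List.length_filter_le _ _)

def stopCriteria_alt (dataSet : List (List String)) : Option String :=
  match PySem.List.pyGet? dataSet 0 with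
  | none => none   -- len(dataSet[0]) raises IndexError on []
  | some row0 =>
    let lastCol : Int := (row0.length : Int) - 1
    match dataSet.mapM (fun row => PySem.List.pyGet? row lastCol) with  -- [row[lastCol] for row in dataSet]
    | none => none   -- row[lastCol] raises IndexError
    | some col =>
      match col with
      | [] => none   -- unreachable: col is as long as dataSet, which is nonempty here
      | l0 :: ct =>
        if ((l0 :: ct).filter (fun y => y != l0)).isEmpty then some l0
        else if lastCol = 0 then (pvBest (l0 :: ct)).map Prod.fst
        else none

-- ===== PRECONDITION & SPEC =====
-- Pre_ excludes exactly the inputs where A raises IndexError: the empty dataSet and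
-- datasets where some row has no entry at Python index len(dataSet[0]) - 1.
def Pre_stopCriteria (dataSet : List (List String)) : Prop :=
  dataSet ≠ [] ∧
  ∀ row ∈ dataSet, (PySem.List.pyGet? row ((dataSet.headD []).length - 1)).isSome = true
instance (dataSet : List (List String)) : Decidable (Pre_stopCriteria dataSet) := by
  unfold Pre_stopCriteria; infer_instance

def pvWitness_stopCriteria : List (List String) := [["x", "a"], ["y", "b"], ["z", "b"]]

def Spec_stopCriteria (dataSet : List (List String)) (out : Option String) : Prop := out = stopCriteria_alt dataSet
instance (dataSet : List (List String)) (out : Option String) : Decidable (Spec_stopCriteria dataSet out) := by unfold Spec_stopCriteria; infer_instance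

-- ===== CLAIM (what is proved, stated in full; the proofs are below) =====
def Claim_equal_stopCriteria : Prop := ∀ (dataSet : List (List String)), Dom_stopCriteria dataSet → Pre_stopCriteria dataSet → Spec_stopCriteria dataSet (stopCriteria dataSet)

-- ===== LEMMAS AND PROOFS =====

-- The step of A's strict-argmax scan over the dict keys.
def pvStep (c : String → Int) (acc : Option String) (x : String) : Option String :=
  match acc with
  | none => some x
  | some m => if c m < c x then some x else some m

-- The combine of B's recursion, on already-paired (label, count) lists.
def pvArg : List (String × Int) → Option (String × Int)
  | [] => none
  | (x, c) :: t =>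
    match pvArg t with
    | none => some (x, c)
    | some (l2, c2) => if c2 ≤ c then some (x, c) else some (l2, c2)

-- A's dict-building loop, run through the already-extracted column.
lemma pv_dictfold_eq (i : Int) :
    ∀ (ds : List (List String)) (col : List String) (d : PySem.Dict String Int),
    ds.mapM (fun row => PySem.List.pyGet? row i) = some col →
    ds.foldl (fun acc row =>
        acc.bind fun d => (PySem.List.pyGet? row i).map fun l =>
          d.insert l (d.getD l 0 + 1)) (some d)
      = some (col.foldl (fun d l => d.insert l (d.getD l 0 + 1)) d) := by
  intro ds
  induction ds with
  | nil =>
    intro col d h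
    simp only [List.mapM_nil, pure, Option.some.injEq] at h
    subst h; rfl
  | cons r rest ih =>
    intro col d h
    rw [List.mapM_cons] at h
    cases hr : PySem.List.pyGet? r i with
    | none => simp [hr] at h
    | some l =>
      cases hrest : rest.mapM (fun row => PySem.List.pyGet? row i) with
      | none => simp [hr, hrest] at h
      | some cs =>
        simp [hr, hrest] at h
        subst h
        simp only [List.foldl_cons, Option.bind_some, hr, Option.map_some]
        exact ih cs _ hrest

-- mapM over Option succeeds when every element does.
lemma pv_mapM_isSome (f : List String → Option String) :
    ∀ (ds : List (List String)), (∀ row ∈ ds, (f row).isSome = true) →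
    ∃ col, ds.mapM f = some col := by
  intro ds
  induction ds with
  | nil => intro _; exact ⟨[], by simp⟩
  | cons r rest ih =>
    intro h
    obtain ⟨l, hl⟩ := Option.isSome_iff_exists.mp (h r (by simp))
    obtain ⟨cs, hcs⟩ := ih (fun row hrow => h row (by simp [hrow]))
    exact ⟨l :: cs, by rw [List.mapM_cons]; simp [hl, hcs]⟩

-- Adding an element already in the set is a no-op, so occurrences of it can be filtered out.
lemma pv_foldl_add_skip (x : String) :
    ∀ (t s : List String), x ∈ s →
    t.foldl PySem.Set.add s = (t.filter (fun y => y != x)).foldl PySem.Set.add s := by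
  intro t
  induction t with
  | nil => intro s _; rfl
  | cons y t ih =>
    intro s hx
    by_cases hyx : y = x
    · subst hyx
      have hadd : PySem.Set.add s y = s := by
        unfold PySem.Set.add
        rw [if_pos (by simpa [PySem.Set.contains, List.contains_eq_mem] using hx)]
      simp only [List.filter_cons, bne_self_eq_false, List.foldl_cons, hadd]
      exact ih s hx
    · have hmem : x ∈ PySem.Set.add s y := by
        unfold PySem.Set.add; split
        · exact hx
        · exact List.mem_append_left _ hx
      simp only [List.filter_cons, show (y != x) = true by simpa using hyx, List.foldl_cons]
      exact ih (PySem.Set.add s y) hmem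

-- A head absent from the remaining elements can be moved outside the fold.
lemma pv_foldl_add_cons (a : String) :
    ∀ (l s : List String), (∀ y ∈ l, y ≠ a) →
    l.foldl PySem.Set.add (a :: s) = a :: l.foldl PySem.Set.add s := by
  intro l
  induction l with
  | nil => intro s _; rfl
  | cons y l ih =>
    intro s h
    have hya : y ≠ a := h y (by simp)
    have hcons : PySem.Set.add (a :: s) y = a :: PySem.Set.add s y := by
      unfold PySem.Set.add
      have : PySem.Set.contains (a :: s) y = PySem.Set.contains s y := by
        simp [PySem.Set.contains, List.contains_eq_mem, hya]
      rw [this]; split <;> simp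
    simp only [List.foldl_cons, hcons]
    exact ih (PySem.Set.add s y) (fun z hz => h z (by simp [hz]))

-- set(x :: t) = x :: set(t with x filtered out).
lemma pv_ofList_cons (x : String) (t : List String) :
    PySem.Set.ofList (x :: t) = x :: PySem.Set.ofList (t.filter (fun y => y != x)) := by
  have h0 : PySem.Set.ofList (x :: t) = t.foldl PySem.Set.add [x] := by
    unfold PySem.Set.ofList
    simp only [List.foldl_cons]
    rfl
  rw [h0, pv_foldl_add_skip x t [x] (by simp)]
  have hfe : ∀ y ∈ t.filter (fun y => y != x), y ≠ x := by
    intro y hy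
    simpa using List.of_mem_filter hy
  exact pv_foldl_add_cons x _ [] hfe

-- The length difference from filtering out x is x's count.
lemma pv_len_sub_filter (x : String) (t : List String) :
    ((x :: t).length : Int) - ((t.filter (fun y => y != x)).length : Int)
      = (List.count x (x :: t) : Int) := by
  have h : (t.filter (fun y => y != x)).length + List.count x t = t.length := by
    induction t with
    | nil => rfl
    | cons y t ih =>
      by_cases hyx : y = x
      · subst hyx
        simp only [List.filter_cons, bne_self_eq_false, Bool.false_eq_true, if_false,
          List.count_cons_self, List.length_cons]
        omega
      · simp only [List.filter_cons, show (y != x) = true by simpa using hyx, if_true,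
          List.length_cons]
        rw [List.count_cons_of_ne (show y ≠ x from hyx)]
        omega
  simp only [List.count_cons_self, List.length_cons]
  omega

-- A's left strict-argmax fold equals B's right `≥`-combine, on paired counts.
lemma pv_foldl_pvArg (c : String → Int) :
    ∀ (l : List String) (m : String),
    l.foldl (pvStep c) (some m)
      = some (match pvArg (l.map (fun x => (x, c x))) with
              | none => m
              | some (l2, c2) => if c2 ≤ c m then m else l2) := by
  intro l
  induction l with
  | nil => intro m; rfl
  | cons x t ih =>
    intro m
    have hstep : pvStep c (some m) x = some (if c m < c x then x else m) := by
      rw [pvStep, apply_ite some]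
    rw [List.foldl_cons, hstep, ih]
    simp only [List.map_cons, pvArg]
    cases hta : pvArg (t.map (fun x => (x, c x))) with
    | none =>
      by_cases h1 : c m < c x
      · simp [h1, show ¬ c x ≤ c m by omega]
      · simp [h1, show c x ≤ c m by omega]
    | some p =>
      obtain ⟨l2, c2⟩ := p
      by_cases h1 : c m < c x
      · by_cases h2 : c2 ≤ c x
        · simp [h1, h2, show ¬ c x ≤ c m by omega]
        · simp [h1, h2, show ¬ c2 ≤ c m by omega]
      · by_cases h2 : c2 ≤ c x
        · simp [h1, h2, show c2 ≤ c m by omega, show c x ≤ c m by omega]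
        · simp [h1, h2]

lemma pv_foldl_pvArg_none (c : String → Int) (l : List String) :
    l.foldl (pvStep c) none = (pvArg (l.map (fun x => (x, c x)))).map Prod.fst := by
  cases l with
  | nil => rfl
  | cons x t =>
    have h0 : pvStep c none x = some x := rfl
    rw [List.foldl_cons, h0, pv_foldl_pvArg, List.map_cons]
    simp only [pvArg]
    cases pvArg (t.map (fun x => (x, c x))) with
    | none => rfl
    | some p =>
      obtain ⟨l2, c2⟩ := p
      by_cases h : c2 ≤ c x <;> simp [h]

-- B's recursion computes pvArg over the deduplicated labels paired with their counts.
lemma pv_pvBest_eq : ∀ (n : Nat) (col : List String), col.length ≤ n →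
    pvBest col
      = pvArg ((PySem.Set.ofList col).map (fun l => (l, (List.count l col : Int)))) := by
  intro n
  induction n with
  | zero =>
    intro col h
    have : col = [] := List.length_eq_zero_iff.mp (Nat.le_zero.mp h)
    subst this
    simp [pvBest, PySem.Set.ofList, pvArg]
  | succ n ih =>
    intro col h
    cases col with
    | nil => simp [pvBest, PySem.Set.ofList, pvArg]
    | cons x t =>
      have hfilter : (x :: t).filter (fun y => y != x) = t.filter (fun y => y != x) := by
        simp
      have hlen : (t.filter (fun y => y != x)).length ≤ n := by
        have := List.length_filter_le (fun y => y != x) t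
        simp only [List.length_cons] at h
        omega
      have hrec := ih (t.filter (fun y => y != x)) hlen
      have hcounts : (PySem.Set.ofList (t.filter (fun y => y != x))).map
            (fun l => (l, (List.count l (t.filter (fun y => y != x)) : Int)))
          = (PySem.Set.ofList (t.filter (fun y => y != x))).map
            (fun l => (l, (List.count l (x :: t) : Int))) := by
        apply List.map_congr_left
        intro l hl
        have hl' : l ∈ t.filter (fun y => y != x) :=
          (PySem.Set.mem_ofList _ _).mp hl
        have hlx : (l != x) = true := (List.mem_filter.mp hl').2
        have hlx' : l ≠ x := by simpa using hlx
        rw [List.count_filter (p := fun y => y != x) (show (fun y => y != x) l = true from hlx),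
          List.count_cons_of_ne (Ne.symm hlx')]
      rw [hcounts] at hrec
      simp only [pvBest, hfilter]
      rw [hrec, pv_ofList_cons x t, List.map_cons, pv_len_sub_filter x t]
      rfl

-- Both ports' branch logic, with the extracted column abstracted out.
lemma pv_core (l0 : String) (ct : List String) (i : Int) :
    (if (PySem.Dict.counter (l0 :: ct)).size = 1 then
        PySem.List.pyGet? (PySem.Dict.counter (l0 :: ct)).keys 0
      else if i = 0 then
        (PySem.Dict.counter (l0 :: ct)).keys.foldl (fun assigned key =>
          match assigned with
          | none => some key
          | some a => if (PySem.Dict.counter (l0 :: ct)).getD a 0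
              < (PySem.Dict.counter (l0 :: ct)).getD key 0 then some key else assigned) none
      else none)
    = (if ((l0 :: ct).filter (fun y => y != l0)).isEmpty then some l0
      else if i = 0 then (pvBest (l0 :: ct)).map Prod.fst
      else none) := by
  have hfilter : (l0 :: ct).filter (fun y => y != l0) = ct.filter (fun y => y != l0) := by
    simp
  have hsize : (PySem.Dict.counter (l0 :: ct)).size
      = (PySem.Set.ofList (l0 :: ct)).length := by
    show (PySem.Dict.counter (l0 :: ct)).items.length = _
    rw [← PySem.Dict.keys_counter]
    simp [PySem.Dict.keys]
  rw [hsize, pv_ofList_cons l0 ct, hfilter]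
  by_cases hempty : ct.filter (fun y => y != l0) = []
  · rw [hempty]
    rw [if_pos (by simp [PySem.Set.ofList]), if_pos (by simp)]
    rw [PySem.Dict.keys_counter, pv_ofList_cons l0 ct, hempty]
    rfl
  · have h1 : ¬ (l0 :: PySem.Set.ofList (ct.filter (fun y => y != l0))).length = 1 := by
      cases hc : ct.filter (fun y => y != l0) with
      | nil => exact absurd hc hempty
      | cons z zs => rw [hc] at *; rw [pv_ofList_cons]; simp
    rw [if_neg h1, if_neg (show ¬ ((ct.filter (fun y => y != l0)).isEmpty = true) by
      simpa [List.isEmpty_iff] using hempty)]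
    by_cases hi : i = 0
    · rw [if_pos hi, if_pos hi]
      have hstepf : (fun (assigned : Option String) key =>
          match assigned with
          | none => some key
          | some a => if (PySem.Dict.counter (l0 :: ct)).getD a 0
              < (PySem.Dict.counter (l0 :: ct)).getD key 0 then some key else assigned)
          = pvStep (fun k => ((List.count k (l0 :: ct) : Nat) : Int)) := by
        funext acc k
        cases acc with
        | none => rfl
        | some a => simp [pvStep, PySem.Dict.getD_counter]
      rw [hstepf, PySem.Dict.keys_counter, pv_foldl_pvArg_none,
        ← pv_pvBest_eq (l0 :: ct).length (l0 :: ct) le_rfl]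
    · rw [if_neg hi, if_neg hi]

-- ===== VERDICT (by name: the statement is the Claim_ definition above) =====
theorem stopCriteria_spec : Claim_equal_stopCriteria := by
  intro dataSet _ hpre
  unfold Spec_stopCriteria
  obtain ⟨hne, hrows⟩ := hpre
  cases dataSet with
  | nil => exact absurd rfl hne
  | cons r0 rest =>
    have hrows' : ∀ row ∈ r0 :: rest,
        (PySem.List.pyGet? row ((r0.length : Int) - 1)).isSome = true := by
      simpa using hrows
    have h0 : PySem.List.pyGet? (r0 :: rest) (0 : Int) = some r0 := by
      simp [pysem]
    obtain ⟨l0, hl0⟩ := Option.isSome_iff_exists.mp (hrows' r0 (by simp))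
    obtain ⟨cs, hcs⟩ := pv_mapM_isSome _ rest (fun row hrow => hrows' row (by simp [hrow]))
    have hmapM : (r0 :: rest).mapM
        (fun row => PySem.List.pyGet? row ((r0.length : Int) - 1)) = some (l0 :: cs) := by
      rw [List.mapM_cons]; simp [hl0, hcs]
    have hfold := pv_dictfold_eq ((r0.length : Int) - 1) (r0 :: rest) (l0 :: cs)
      PySem.Dict.empty hmapM
    rw [PySem.Dict.foldl_insert_getD_add_one_eq_counter] at hfold
    unfold stopCriteria stopCriteria_alt
    simp only [h0, hmapM, hfold]
    exact pv_core l0 cs ((r0.length : Int) - 1)
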